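-- pv_equiv track=rewrite | github.com/sbl1996/ygo-agent | ygoinf/ygoinf/features.py | combinations_with_weight2
-- ===== SOURCE A (Python) =====
-- from itertools import combinations
--
-- def sum_to2(w, ind, r):
--     return sum_to2_helper(w, ind, 0, r)
--
-- def sum_to2_helper(w, ind, i, r):
--     if r <= 0:
--         return False
--     n = len(ind)
--     w_ = w[ind[i]]
--     if i == n - 1:
--         if len(w_) == 1:
--             return w_[0] == r
--         else:
--             return w_[0] == r or w_[1] == r
--     if len(w_) == 1:
--         return sum_to2_helper(w, ind, i + 1, r - w_[0])
--     else:
--         return sum_to2_helper(w, ind, i + 1, r - w_[0]) or sum_to2_helper(w, ind, i + 1, r - w_[1])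
--
-- def combinations_with_weight2(weights, r):
--     n = len(weights)
--     results = []
--
--     for k in range(1, n + 1):
--         combs = list(combinations(range(n), k))
--         for comb in combs:
--             if sum_to2(weights, comb, r):
--                 results.append(set(comb))
--     return results
-- ===== SOURCE B (Python) =====
-- from itertools import combinations
--
-- def combinations_with_weight2(weights, r):
--     n = len(weights)
--     results = []
--     for k in range(1, n + 1):
--         for comb in combinations(range(n), k):
--             sums = {0}
--             for idx in comb:
--                 choices = weights[idx][:2]
--                 sums = {s + w for s in sums if s < r for w in choices}
--             if r in sums:
--                 results.append(set(comb))
--     return results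
-- ===== Notes on version B (the rewrite author's own statement) =====
-- stated objective: alternative
-- what changed: Per-subset feasibility is decided by an iterative reachable-partial-sum set DP (duplicated partial sums collapse) instead of A's exponential two-way branching recursion; subset enumeration order is unchanged.
import Mathlib
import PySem

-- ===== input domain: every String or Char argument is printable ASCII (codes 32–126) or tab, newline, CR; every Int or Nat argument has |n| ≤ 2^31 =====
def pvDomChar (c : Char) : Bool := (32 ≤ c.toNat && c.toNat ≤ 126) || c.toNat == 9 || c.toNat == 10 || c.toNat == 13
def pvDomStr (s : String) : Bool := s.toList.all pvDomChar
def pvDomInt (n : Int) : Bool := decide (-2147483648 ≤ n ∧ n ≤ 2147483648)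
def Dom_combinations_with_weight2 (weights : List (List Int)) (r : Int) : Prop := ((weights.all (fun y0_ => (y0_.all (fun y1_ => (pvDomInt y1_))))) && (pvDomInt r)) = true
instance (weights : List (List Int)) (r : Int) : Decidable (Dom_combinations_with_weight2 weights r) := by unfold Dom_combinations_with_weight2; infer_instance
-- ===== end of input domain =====

-- B replaces A's exponential two-way branching recursion per subset by an iterative
-- reachable-partial-sum set DP; same subset enumeration order (objective: alternative algorithm).

-- ===== PORT A =====
-- itertools.combinations(l, k) in lexicographic order (shared library helper: both Pythons call it)
def pvCombos (l : List Int) (k : Nat) : List (List Int) :=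
  match k, l with
  | 0, _ => [[]]
  | _ + 1, [] => []
  | k + 1, x :: xs => (pvCombos xs k).map (fun c => x :: c) ++ pvCombos xs (k + 1)

-- sum_to2_helper: the index i advancing over ind is ported as consuming the list ind
def pvSumTo2Helper (w : List (List Int)) (ind : List Int) (r : Int) : Bool :=
  match ind with
  | [] => false   -- unreachable: every comb is nonempty
  | [j] =>
    if r ≤ 0 then false else
    match PySem.List.pyGetD w j [] with
    | [] => false   -- Python raises IndexError here; outside Pre_
    | [a] => a == r
    | a :: b :: _ => a == r || b == r
  | j :: rest =>
    if r ≤ 0 then false else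
    match PySem.List.pyGetD w j [] with
    | [] => false   -- Python raises IndexError here; outside Pre_
    | [a] => pvSumTo2Helper w rest (r - a)
    | a :: b :: _ => pvSumTo2Helper w rest (r - a) || pvSumTo2Helper w rest (r - b)

def combinations_with_weight2 (weights : List (List Int)) (r : Int) : List (List Int) :=
  let n := weights.length
  (List.range' 1 n).foldl (fun results k =>
    (pvCombos ((List.range n).map Int.ofNat) k).foldl (fun results comb =>
      if pvSumTo2Helper weights comb r then results ++ [PySem.Set.ofList comb] else results)
      results) []

-- ===== PORT B =====
-- one DP step: sums = {s + w for s in sums if s < r for w in weights[idx][:2]}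
def pvDpStep (w : List (List Int)) (r : Int) (sums : PySem.Set Int) (idx : Int) : PySem.Set Int :=
  let choices := PySem.List.slice (PySem.List.pyGetD w idx []) none (some 2)
  PySem.Set.ofList ((sums.filter (fun s => s < r)).flatMap (fun s => choices.map (fun c => s + c)))

def combinations_with_weight2_alt (weights : List (List Int)) (r : Int) : List (List Int) :=
  let n := weights.length
  (List.range' 1 n).foldl (fun results k =>
    (pvCombos ((List.range n).map Int.ofNat) k).foldl (fun results comb =>
      let sums := comb.foldl (pvDpStep weights r) (PySem.Set.ofList [0])
      if sums.contains r then results ++ [PySem.Set.ofList comb] else results)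
      results) []

-- ===== PRECONDITION & SPEC =====
-- Pre_ excludes exactly the inputs where Python A raises IndexError: some inner weight
-- list is empty while r > 0 (the singleton subset of that index reaches w_[0]).
def Pre_combinations_with_weight2 (weights : List (List Int)) (r : Int) : Prop :=
  r ≤ 0 ∨ ∀ wl ∈ weights, wl ≠ []
instance (weights : List (List Int)) (r : Int) : Decidable (Pre_combinations_with_weight2 weights r) := by unfold Pre_combinations_with_weight2; infer_instance

def pvWitness_combinations_with_weight2 : List (List Int) × Int := ([[1], [2, 3]], 3)

def Spec_combinations_with_weight2 (weights : List (List Int)) (r : Int) (out : List (List Int)) : Prop := out = combinations_with_weight2_alt weights r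
instance (weights : List (List Int)) (r : Int) (out : List (List Int)) : Decidable (Spec_combinations_with_weight2 weights r out) := by unfold Spec_combinations_with_weight2; infer_instance

-- ===== CLAIM (what is proved, stated in full; the proofs are below) =====
def Claim_equal_combinations_with_weight2 : Prop := ∀ (weights : List (List Int)) (r : Int), Dom_combinations_with_weight2 weights r → Pre_combinations_with_weight2 weights r → Spec_combinations_with_weight2 weights r (combinations_with_weight2 weights r)

-- ===== LEMMAS AND PROOFS =====

theorem pvCombos_length {l : List Int} {k : Nat} {c : List Int}
    (h : c ∈ pvCombos l k) : c.length = k := by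
  induction l generalizing k c with
  | nil =>
    cases k with
    | zero => simp [pvCombos] at h; simp [h]
    | succ k => simp [pvCombos] at h
  | cons x xs ih =>
    cases k with
    | zero => simp [pvCombos] at h; simp [h]
    | succ k =>
      simp only [pvCombos, List.mem_append, List.mem_map] at h
      rcases h with ⟨c', hc', rfl⟩ | h
      · simp [ih hc']
      · exact ih h

-- one DP step's membership ↔ one step of A's recursion (last index)
theorem pv_last_step (w : List (List Int)) (j r s : Int) :
    (s < r ∧ ∃ c ∈ PySem.List.slice (PySem.List.pyGetD w j []) none (some 2), s + c = r)
      ↔ pvSumTo2Helper w [j] (r - s) = true := by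
  rcases h : PySem.List.pyGetD w j [] with _ | ⟨a, _ | ⟨b, t⟩⟩ <;>
    simp [pvSumTo2Helper, h, PySem.List.slice] <;> omega

theorem pv_cons_step (w : List (List Int)) (j r s : Int) (x : Int) (rest : List Int) :
    (s < r ∧ ∃ c ∈ PySem.List.slice (PySem.List.pyGetD w j []) none (some 2),
        pvSumTo2Helper w (x :: rest) (r - (s + c)) = true)
      ↔ pvSumTo2Helper w (j :: x :: rest) (r - s) = true := by
  rcases h : PySem.List.pyGetD w j [] with _ | ⟨a, _ | ⟨b, t⟩⟩
  · simp [pvSumTo2Helper, h, PySem.List.slice]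
  · simp [pvSumTo2Helper, h, PySem.List.slice]
    intro _
    rw [show r - (s + a) = r - s - a from by ring]
  · simp [pvSumTo2Helper, h, PySem.List.slice]
    intro _
    rw [show r - (s + a) = r - s - a from by ring, show r - (s + b) = r - s - b from by ring]

-- the DP fold reaches r iff A's recursion accepts from some starting partial sum
theorem pv_dp_mem (w : List (List Int)) (r : Int) :
    ∀ (ind : List Int), ind ≠ [] → ∀ (sums : List Int),
      (r ∈ ind.foldl (pvDpStep w r) sums ↔ ∃ s ∈ sums, pvSumTo2Helper w ind (r - s) = true) := by
  intro ind
  induction ind with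
  | nil => intro h; exact absurd rfl h
  | cons j rest ih =>
    intro _ sums
    cases rest with
    | nil =>
      simp only [List.foldl_cons, List.foldl_nil, pvDpStep, PySem.Set.mem_ofList,
        List.mem_flatMap, List.mem_filter, List.mem_map, decide_eq_true_eq]
      constructor
      · rintro ⟨s, ⟨hs, hlt⟩, c, hc, rfl⟩
        exact ⟨s, hs, (pv_last_step w j (s + c) s).1 ⟨hlt, c, hc, rfl⟩⟩
      · rintro ⟨s, hs, hh⟩
        rcases (pv_last_step w j r s).2 hh with ⟨hlt, c, hc, hrc⟩
        exact ⟨s, ⟨hs, hlt⟩, c, hc, hrc⟩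
    | cons x rest' =>
      rw [List.foldl_cons, ih (by simp) (pvDpStep w r sums j)]
      constructor
      · rintro ⟨s', hs', hh⟩
        simp only [pvDpStep, PySem.Set.mem_ofList, List.mem_flatMap, List.mem_filter,
          List.mem_map, decide_eq_true_eq] at hs'
        rcases hs' with ⟨s, ⟨hs, hlt⟩, c, hc, rfl⟩
        exact ⟨s, hs, (pv_cons_step w j r s x rest').1 ⟨hlt, c, hc, hh⟩⟩
      · rintro ⟨s, hs, hh⟩
        rcases (pv_cons_step w j r s x rest').2 hh with ⟨hlt, c, hc, hh'⟩
        refine ⟨s + c, ?_, hh'⟩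
        simp only [pvDpStep, PySem.Set.mem_ofList, List.mem_flatMap, List.mem_filter,
          List.mem_map, decide_eq_true_eq]
        exact ⟨s, ⟨hs, hlt⟩, c, hc, rfl⟩

-- per nonempty subset: A's test equals B's DP membership test
theorem pv_comb_cond (w : List (List Int)) (r : Int) (comb : List Int) (h : comb ≠ []) :
    pvSumTo2Helper w comb r
      = PySem.Set.contains (comb.foldl (pvDpStep w r) (PySem.Set.ofList [0])) r := by
  rw [Bool.eq_iff_iff]
  simp only [PySem.Set.contains, List.contains_iff_mem]
  rw [pv_dp_mem w r comb h (PySem.Set.ofList [0])]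
  constructor
  · intro hh
    exact ⟨0, by simp [PySem.Set.mem_ofList], by simpa using hh⟩
  · rintro ⟨s, hs, hh⟩
    rw [PySem.Set.mem_ofList] at hs
    simp only [List.mem_singleton] at hs
    subst hs
    simpa using hh

-- ===== VERDICT (by name: the statement is the Claim_ definition above) =====
theorem combinations_with_weight2_spec : Claim_equal_combinations_with_weight2 := by
  intro weights r _ _
  unfold Spec_combinations_with_weight2 combinations_with_weight2 combinations_with_weight2_alt
  apply PySem.List.foldl_congr_mem
  intro results k hk
  apply PySem.List.foldl_congr_mem
  intro results' comb hcomb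
  have hk1 : 1 ≤ k := by
    have := List.mem_range'.1 hk
    omega
  have hlen := pvCombos_length hcomb
  have hne : comb ≠ [] := by
    intro hnil
    rw [hnil] at hlen
    simp at hlen
    omega
  simp only [pv_comb_cond weights r comb hne]
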